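-- pv_equiv track=rewrite | github.com/nicica/bitmap_index | main.py | create_bitmap_index
-- ===== SOURCE A (Python) =====
-- def create_bitmap_index(values):
--     indexes = {}
--     d_values = set(item for item in values)
--     for val in d_values:
--         index_value = 0b0
--         for i in range(len(values)):
--             if val==values[i]:
--                 index_value|= (1<< (len(values)-1-i))
--         index_value=bin(index_value)
--         indexes[val]=index_value
--     return indexes
-- ===== SOURCE B (Python) =====
-- def create_bitmap_index(values):
--     n = len(values)
--     masks = {}
--     for i, v in enumerate(values):
--         masks[v] = masks.get(v, 0) | (1 << (n - 1 - i))
--     return {v: bin(m) for v, m in masks.items()}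
-- ===== Notes on version B (the rewrite author's own statement) =====
-- stated objective: faster
-- what changed: Replaces the per-distinct-value rescan of the whole list (O(u*n)) by a single enumerate pass that ORs each element's bit into a dict entry, then one formatting pass; intended as faster, measured 13.2x at n=4096 (the check could not confirm the largest rung).
import Mathlib
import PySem

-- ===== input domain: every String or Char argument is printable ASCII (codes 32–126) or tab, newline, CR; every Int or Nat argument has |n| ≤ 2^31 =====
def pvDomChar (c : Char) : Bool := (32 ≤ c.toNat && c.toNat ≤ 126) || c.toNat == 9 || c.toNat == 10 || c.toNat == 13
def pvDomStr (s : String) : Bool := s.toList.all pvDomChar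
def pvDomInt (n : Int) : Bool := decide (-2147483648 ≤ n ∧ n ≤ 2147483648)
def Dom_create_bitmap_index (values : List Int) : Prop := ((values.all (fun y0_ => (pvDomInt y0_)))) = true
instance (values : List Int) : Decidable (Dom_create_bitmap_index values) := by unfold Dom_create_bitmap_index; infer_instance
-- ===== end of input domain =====

-- B replaces A's rescan of the whole list per distinct value by one enumerate pass OR-ing
-- each element's bit into a dict entry (objective: faster, intended asymptotic O(u*n) -> O(n); timing run measured 13.2x at n=4096, unconfirmed beyond).
-- Python iterates a set (hash order) to build the returned dict; dict outputs are compared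
-- ignoring order, and the port uses the set's first-occurrence order.

-- ===== PORT A =====
-- shared helper: Python's bin(m) for m ≥ 0 (both Pythons call bin); exact for nonnegative ints
def pyBinCore : Nat → List Char
  | 0 => []
  | (n+1) => pyBinCore ((n+1)/2) ++ [if (n+1) % 2 == 1 then '1' else '0']

def pyBin (m : Nat) : String :=
  String.ofList ('0' :: 'b' :: (if m = 0 then ['0'] else pyBinCore m))

def create_bitmap_index (values : List Int) : List (Int × String) :=
  let d_values : PySem.Set Int := PySem.Set.ofList values
  let indexes : PySem.Dict Int String :=
    d_values.foldl (fun indexes val =>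
      let index_value : Nat :=
        (PySem.List.pyRange 0 (values.length : Int) 1).foldl
          (fun acc i =>
            if val = PySem.List.pyGetD values i 0
            then acc ||| ((1 : Nat) <<< (values.length - 1 - i.toNat))
            else acc) 0
      indexes.insert val (pyBin index_value)) PySem.Dict.empty
  indexes.items

-- ===== PORT B =====
def create_bitmap_index_alt (values : List Int) : List (Int × String) :=
  let n := values.length
  let masks : PySem.Dict Int Nat :=
    (PySem.List.enumerate values 0).foldl
      (fun d p => d.insert p.2 (d.getD p.2 0 ||| ((1 : Nat) <<< (n - 1 - p.1.toNat))))
      PySem.Dict.empty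
  masks.items.map (fun p => (p.1, pyBin p.2))

-- ===== PRECONDITION & SPEC =====
def Spec_create_bitmap_index (values : List Int) (out : List (Int × String)) : Prop := out = create_bitmap_index_alt values
instance (values : List Int) (out : List (Int × String)) : Decidable (Spec_create_bitmap_index values out) := by unfold Spec_create_bitmap_index; infer_instance

-- ===== CLAIM (what is proved, stated in full; the proofs are below) =====
def Claim_equal_create_bitmap_index : Prop := ∀ (values : List Int), Dom_create_bitmap_index values → Spec_create_bitmap_index values (create_bitmap_index values)

-- ===== LEMMAS AND PROOFS =====

-- a lookup through B's insert/OR loop is A's conditional-OR fold over the same pairs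
theorem getD_foldl_insert_or (l : List (Int × Int)) (d : PySem.Dict Int Nat)
    (v : Int) (f : Int → Nat) :
    (l.foldl (fun d p => d.insert p.2 (d.getD p.2 0 ||| f p.1)) d).getD v 0
      = l.foldl (fun acc p => if p.2 = v then acc ||| f p.1 else acc) (d.getD v 0) := by
  induction l generalizing d with
  | nil => rfl
  | cons p t ih =>
    simp only [List.foldl_cons]
    rw [ih]
    congr 1
    rw [PySem.Dict.getD_insert]
    by_cases h : v = p.2
    · subst h; simp
    · rw [if_neg h, if_neg (mt Eq.symm h)]

theorem create_bitmap_index_spec : Claim_equal_create_bitmap_index := by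
  intro values _
  unfold Spec_create_bitmap_index create_bitmap_index create_bitmap_index_alt
  dsimp only
  rw [PySem.Dict.items_foldl_insert_fresh
        (PySem.Set.ofList values) (fun a => a)
        (fun val => pyBin ((PySem.List.pyRange 0 (values.length : Int) 1).foldl
          (fun acc i =>
            if val = PySem.List.pyGetD values i 0
            then acc ||| ((1 : Nat) <<< (values.length - 1 - i.toNat))
            else acc) 0))
        PySem.Dict.empty
        (fun a _ => PySem.Dict.contains_empty a)
        (by simp)]
  have hnd : ((PySem.List.enumerate values 0).foldl
      (fun (d : PySem.Dict Int Nat) (p : Int × Int) => d.insert p.2 (d.getD p.2 0 ||| ((1 : Nat) <<< (values.length - 1 - p.1.toNat))))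
      PySem.Dict.empty).keys.Nodup :=
    PySem.Dict.nodup_keys_foldl_insert_key _ (fun p : Int × Int => p.2) _ _ (by rw [PySem.Dict.keys_empty]; exact List.nodup_nil)
  rw [PySem.Dict.items_eq_map_keys _ hnd 0]
  rw [PySem.Dict.keys_foldl_insert_key]
  simp only [PySem.List.map_snd_enumerate, PySem.Dict.keys_empty, PySem.Set.update_nil_left,
    List.map_map]
  have hempty : (PySem.Dict.empty : PySem.Dict Int String).items = [] := rfl
  rw [hempty, List.nil_append]
  apply List.map_congr_left
  intro v _
  simp only [Function.comp]
  congr 1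
  rw [getD_foldl_insert_or (PySem.List.enumerate values 0) PySem.Dict.empty v (fun i => (1 : Nat) <<< (values.length - 1 - i.toNat))]
  rw [PySem.List.enumerate_eq_map_pyRange values 0, List.foldl_map]
  simp [PySem.Dict.getD_empty, eq_comm, PySem.List.len_eq]
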